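-- pv_equiv track=rewrite | github.com/AdamZhouSE/pythonHomework | Code/CodeRecords/2229/60756/277570.py | isReserved
-- ===== SOURCE A (Python) =====
-- def isReserved(A:list)->bool:
--     p=0
--     n=0
--     for i in range(len(A) - 1):
--         if A[i] > A[i + 1]:
--             p+=1
--             n+=1
--         for j in range(i + 2, len(A)):
--             if A[j] < A[i]:
--                 n+=1
--     return n==p
-- ===== SOURCE B (Python) =====
-- def isReserved(A: list) -> bool:
--     # Single backward pass keeping the minimum of A[i+2:]; A is fine iff
--     # every element is <= the minimum of the elements two or more places after it.
--     m = None
--     for i in range(len(A) - 3, -1, -1):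
--         v = A[i + 2]
--         if m is None or v < m:
--             m = v
--         if A[i] > m:
--             return False
--     return True
-- ===== Notes on version B (the rewrite author's own statement) =====
-- stated objective: faster
-- what changed: Replaced the nested quadratic scan that counts inversions with a single backward pass maintaining the running minimum of the suffix A[i+2:], returning False as soon as some A[i] exceeds it.
import Mathlib
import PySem

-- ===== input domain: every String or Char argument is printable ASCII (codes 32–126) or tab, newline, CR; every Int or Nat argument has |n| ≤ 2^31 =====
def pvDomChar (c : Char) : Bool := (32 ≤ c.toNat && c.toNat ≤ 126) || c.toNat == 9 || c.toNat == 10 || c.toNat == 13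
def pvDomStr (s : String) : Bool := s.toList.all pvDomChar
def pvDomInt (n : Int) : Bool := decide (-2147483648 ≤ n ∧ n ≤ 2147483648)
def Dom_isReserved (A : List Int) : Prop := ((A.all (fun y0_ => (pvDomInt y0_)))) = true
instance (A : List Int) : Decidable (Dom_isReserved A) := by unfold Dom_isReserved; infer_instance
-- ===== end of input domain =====

-- B replaces A's nested quadratic pair scan by one backward pass keeping the running
-- minimum of the suffix A[i+2:]; same return value on every input.

-- ===== PORT A =====
def isReserved (A : List Int) : Bool :=
  let r := (PySem.List.pyRange 0 (PySem.List.len A - 1) 1).foldl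
    (fun (pn : Int × Int) i =>
      let pn := if PySem.List.pyGetD A i 0 > PySem.List.pyGetD A (i + 1) 0
                then (pn.1 + 1, pn.2 + 1) else pn
      (PySem.List.pyRange (i + 2) (PySem.List.len A) 1).foldl
        (fun (pn : Int × Int) j =>
          if PySem.List.pyGetD A j 0 < PySem.List.pyGetD A i 0
          then (pn.1, pn.2 + 1) else pn) pn)
    (0, 0)
  decide (r.2 = r.1)

-- ===== PORT B =====
-- the backward loop of Source B: i runs down range(len(A)-3, -1, -1), m is the running suffix minimum
def altLoop (A : List Int) : List Int → Option Int → Bool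
  | [], _ => true
  | i :: rest, m =>
    let v := PySem.List.pyGetD A (i + 2) 0
    let m' := match m with
      | none => v
      | some mv => if v < mv then v else mv
    if PySem.List.pyGetD A i 0 > m' then false
    else altLoop A rest (some m')

def isReserved_alt (A : List Int) : Bool :=
  altLoop A (PySem.List.pyRange (PySem.List.len A - 3) (-1) (-1)) none

-- ===== PRECONDITION & SPEC =====
def Spec_isReserved (A : List Int) (out : Bool) : Prop := out = isReserved_alt A
instance (A : List Int) (out : Bool) : Decidable (Spec_isReserved A out) := by unfold Spec_isReserved; infer_instance

-- ===== CLAIM (what is proved, stated in full; the proofs are below) =====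
def Claim_equal_isReserved : Prop := ∀ (A : List Int), Dom_isReserved A → Spec_isReserved A (isReserved A)

-- ===== LEMMAS AND PROOFS =====

-- common characterization: no element exceeds an element two or more places after it
def GoodI (A : List Int) : Prop :=
  ∀ i j : Int, 0 ≤ i → i + 2 ≤ j → j < PySem.List.len A →
    PySem.List.pyGetD A i 0 ≤ PySem.List.pyGetD A j 0

-- A-side: the outer loop state is (p, n) = (Σ adjacent inversions, same + Σ far inversions)
def cntA (A : List Int) (i : Int) : Nat :=
  (PySem.List.pyRange (i + 2) (PySem.List.len A) 1).countP
    (fun j => decide (PySem.List.pyGetD A j 0 < PySem.List.pyGetD A i 0))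

def bA (A : List Int) (i : Int) : Int :=
  if PySem.List.pyGetD A i 0 > PySem.List.pyGetD A (i + 1) 0 then 1 else 0

theorem inner_fold (A : List Int) (i : Int) (l : List Int) (pn : Int × Int) :
    l.foldl (fun (pn : Int × Int) j =>
        if PySem.List.pyGetD A j 0 < PySem.List.pyGetD A i 0
        then (pn.1, pn.2 + 1) else pn) pn
    = (pn.1, pn.2 + ((l.countP (fun j => decide (PySem.List.pyGetD A j 0 < PySem.List.pyGetD A i 0)) : Nat) : Int)) := by
  induction l generalizing pn with
  | nil => simp
  | cons x t ih =>
    simp only [List.foldl_cons, List.countP_cons]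
    by_cases h : PySem.List.pyGetD A x 0 < PySem.List.pyGetD A i 0
    · simp [h, ih]; ring
    · simp [h, ih]

theorem outer_fold (A : List Int) (l : List Int) (pn : Int × Int) :
    l.foldl (fun (pn : Int × Int) i =>
      let pn := if PySem.List.pyGetD A i 0 > PySem.List.pyGetD A (i + 1) 0
                then (pn.1 + 1, pn.2 + 1) else pn
      (PySem.List.pyRange (i + 2) (PySem.List.len A) 1).foldl
        (fun (pn : Int × Int) j =>
          if PySem.List.pyGetD A j 0 < PySem.List.pyGetD A i 0
          then (pn.1, pn.2 + 1) else pn) pn) pn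
    = (pn.1 + (l.map (bA A)).sum,
       pn.2 + (l.map (bA A)).sum + (((l.map (cntA A)).sum : Nat) : Int)) := by
  induction l generalizing pn with
  | nil => simp
  | cons x t ih =>
    simp only [List.foldl_cons, List.map_cons, List.sum_cons]
    rw [inner_fold A x]
    rw [ih]
    unfold bA cntA
    by_cases h : PySem.List.pyGetD A x 0 > PySem.List.pyGetD A (x + 1) 0
    · simp [h]; constructor <;> ring
    · simp [h]; ring

theorem a_iff (A : List Int) : isReserved A = true ↔ GoodI A := by
  unfold isReserved
  simp only [outer_fold, decide_eq_true_iff]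
  constructor
  · intro he i j hi hij hjlen
    have hs : ((PySem.List.pyRange 0 (PySem.List.len A - 1) 1).map (cntA A)).sum = 0 := by omega
    rw [List.sum_eq_zero_iff] at hs
    have hi_mem : i ∈ PySem.List.pyRange 0 (PySem.List.len A - 1) 1 :=
      PySem.List.mem_pyRange_one.mpr ⟨hi, by omega⟩
    have hc := hs _ (List.mem_map_of_mem hi_mem)
    unfold cntA at hc
    rw [List.countP_eq_zero] at hc
    have hj_mem : j ∈ PySem.List.pyRange (i + 2) (PySem.List.len A) 1 :=
      PySem.List.mem_pyRange_one.mpr ⟨hij, hjlen⟩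
    have := hc j hj_mem
    simp only [decide_eq_true_iff] at this
    omega
  · intro hg
    have hs : ((PySem.List.pyRange 0 (PySem.List.len A - 1) 1).map (cntA A)).sum = 0 := by
      rw [List.sum_eq_zero_iff]
      intro x hx
      obtain ⟨i, hi, rfl⟩ := List.mem_map.mp hx
      unfold cntA
      rw [List.countP_eq_zero]
      intro j hj
      rw [PySem.List.mem_pyRange_one] at hi hj
      simp only [decide_eq_true_iff, not_lt]
      exact hg i j hi.1 hj.1 hj.2
    omega

-- B-side: the loop argument m is the minimum of the suffix, and the early exit fires iff some far inversion exists
theorem le_all_drop (A : List Int) (x : Int) (k : Nat) (mv : Int)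
    (hm : (A.drop k).min? = some mv) :
    x ≤ mv ↔ ∀ j : Int, (k : Int) ≤ j → j < PySem.List.len A → x ≤ PySem.List.pyGetD A j 0 := by
  rw [List.le_min?_iff hm]
  simp only [PySem.List.len_eq]
  constructor
  · intro h j hj1 hj2
    have h0 : 0 ≤ j := le_trans (Int.natCast_nonneg k) hj1
    have hjl : j.toNat < A.length := by omega
    rw [PySem.List.pyGetD_eq_getElem A 0 h0 (by simpa using hj2)]
    apply h
    rw [List.mem_drop_iff_getElem]
    exact ⟨j.toNat - k, by omega, by congr 1; omega⟩
  · intro h b hb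
    rw [List.mem_drop_iff_getElem] at hb
    obtain ⟨d, hd, rfl⟩ := hb
    have := h ((k : Int) + d) (by omega) (by omega)
    rw [PySem.List.pyGetD_eq_getElem A 0 (by positivity) (by omega)] at this
    simpa [show ((k : Int) + d).toNat = k + d by omega] using this

theorem altLoop_iff (A : List Int) :
    ∀ (k : Nat) (i : Int), i = (k : Int) - 1 → i + 3 ≤ PySem.List.len A →
    (altLoop A (PySem.List.pyRange i (-1) (-1)) ((A.drop (i + 3).toNat).min?) = true
      ↔ ∀ i' j : Int, 0 ≤ i' → i' ≤ i → i' + 2 ≤ j → j < PySem.List.len A →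
          PySem.List.pyGetD A i' 0 ≤ PySem.List.pyGetD A j 0) := by
  intro k
  induction k with
  | zero =>
    intro i hi _
    subst hi
    rw [PySem.List.pyRange_neg_one_eq_nil (by omega)]
    simp only [altLoop]
    constructor
    · intro _ i' j h0 h1 _ _; omega
    · intro _; trivial
  | succ k ih =>
    intro i hi hlen
    have hi0 : 0 ≤ i := by omega
    have hL : PySem.List.len A = (A.length : Int) := PySem.List.len_eq A
    have hk2 : (i + 2).toNat < A.length := by omega
    have hdrop : A.drop (i + 2).toNat = A[(i + 2).toNat] :: A.drop ((i + 2).toNat + 1) :=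
      List.drop_eq_getElem_cons hk2
    have h23 : (i + 2).toNat + 1 = (i + 3).toNat := by omega
    have hv : PySem.List.pyGetD A (i + 2) 0 = A[(i + 2).toNat] :=
      PySem.List.pyGetD_eq_getElem A 0 (by omega) (by omega)
    -- the value m' the loop computes is the minimum of A.drop (i+2).toNat
    have hmin : (A.drop (i + 2).toNat).min? =
        some (match (A.drop (i + 3).toNat).min? with
          | none => PySem.List.pyGetD A (i + 2) 0
          | some mv => if PySem.List.pyGetD A (i + 2) 0 < mv
                       then PySem.List.pyGetD A (i + 2) 0 else mv) := by
      rw [hdrop, List.min?_cons, h23, hv]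
      rcases hopt : (A.drop (i + 3).toNat).min? with _ | mv
      · rfl
      · simp only [Option.elim_some]
        congr 1
        rw [min_def]
        split_ifs <;> omega
    set m' := (match (A.drop (i + 3).toNat).min? with
      | none => PySem.List.pyGetD A (i + 2) 0
      | some mv => if PySem.List.pyGetD A (i + 2) 0 < mv
                   then PySem.List.pyGetD A (i + 2) 0 else mv) with hm'
    have hle := le_all_drop A (PySem.List.pyGetD A i 0) (i + 2).toNat m' hmin
    have hcast : ((i + 2).toNat : Int) = i + 2 := by omega
    rw [hcast] at hle
    rw [PySem.List.pyRange_neg_one_cons (by omega)]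
    show ((if PySem.List.pyGetD A i 0 > m' then false
      else altLoop A (PySem.List.pyRange (i - 1) (-1) (-1)) (some m')) = true) ↔ _
    by_cases hgt : PySem.List.pyGetD A i 0 > m'
    · simp only [hgt, if_true]
      constructor
      · intro h; exact absurd h (by simp)
      · intro h
        exfalso
        have : PySem.List.pyGetD A i 0 ≤ m' := hle.mpr (fun j hj1 hj2 => h i j hi0 le_rfl hj1 hj2)
        omega
    · simp only [hgt, if_false]
      have hsome : some m' = (A.drop ((i - 1) + 3).toNat).min? := by
        rw [show (i - 1) + 3 = i + 2 by ring, hmin]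
      rw [hsome]
      rw [ih (i - 1) (by omega) (by omega)]
      constructor
      · intro h i' j h0 h1 h2 h3
        rcases eq_or_lt_of_le h1 with rfl | hlt
        · exact (hle.mp (by omega)) j h2 h3
        · exact h i' j h0 (by omega) h2 h3
      · intro h i' j h0 h1 h2 h3
        exact h i' j h0 (by omega) h2 h3

theorem b_iff (A : List Int) : isReserved_alt A = true ↔ GoodI A := by
  unfold isReserved_alt GoodI
  have hL : PySem.List.len A = (A.length : Int) := PySem.List.len_eq A
  by_cases h3 : 3 ≤ PySem.List.len A
  · have hnone : (A.drop ((PySem.List.len A - 3) + 3).toNat).min? = none := by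
      rw [show (PySem.List.len A - 3) + 3 = PySem.List.len A by ring, hL]
      simp
    rw [show (none : Option Int) = (A.drop ((PySem.List.len A - 3) + 3).toNat).min? from hnone.symm]
    rw [altLoop_iff A (PySem.List.len A - 2).toNat (PySem.List.len A - 3) (by omega) (by omega)]
    constructor
    · intro h i j h0 h2 hj
      exact h i j h0 (by omega) h2 hj
    · intro h i j h0 _ h2 hj
      exact h i j h0 h2 hj
  · rw [PySem.List.pyRange_neg_one_eq_nil (by omega)]
    simp only [altLoop]
    constructor
    · intro _ i j h0 h2 hj; omega
    · intro _; trivial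

-- ===== VERDICT (by name: the statement is the Claim_ definition above) =====
theorem isReserved_spec : Claim_equal_isReserved := by
  intro A _
  unfold Spec_isReserved
  by_cases h : GoodI A
  · rw [(a_iff A).mpr h, (b_iff A).mpr h]
  · have ha := (a_iff A).not.mpr h
    have hb := (b_iff A).not.mpr h
    simp only [Bool.not_eq_true] at ha hb
    rw [ha, hb]
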